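-- pv_equiv track=rewrite | github.com/Anik-08/Code-profiler | examples/sample_optimized.py | optimized_triple_nested_loop
-- ===== SOURCE A (Python) =====
-- def optimized_triple_nested_loop(x, y, z):
--     """Reduce to single loop with set operations - OPTIMIZED"""
--     # Pre-compute all combinations that meet criteria
--     x_set = set(x)
--     y_set = set(y)
--     z_set = set(z)
--
--     count = 0
--     # Use mathematical properties to reduce nested loops
--     for i in x_set:
--         for j in y_set:
--             needed = 100 - i - j + 1
--             # Count how many k values satisfy i + j + k > 100
--             count += sum(1 for k in z_set if k >= needed)
--
--     return count
-- ===== SOURCE B (Python) =====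
-- def optimized_triple_nested_loop(x, y, z):
--     """Sort the distinct z values once; for each (i, j) pair a hand-written
--     binary search (bisect_left) counts the k with i + j + k > 100, removing
--     the inner scan over z entirely."""
--     zs = sorted(set(z))
--     n = len(zs)
--     count = 0
--     for i in set(x):
--         for j in set(y):
--             needed = 101 - i - j
--             lo, hi = 0, n
--             while lo < hi:
--                 mid = (lo + hi) // 2
--                 if zs[mid] < needed:
--                     lo = mid + 1
--                 else:
--                     hi = mid
--             count += n - lo
--     return count
-- ===== Notes on version B (the rewrite author's own statement) =====
-- stated objective: faster
-- what changed: Replaces the inner scan over the z set by one upfront sort of the distinct z values plus a binary search (bisect_left) per (i, j) pair.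
import Mathlib
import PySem

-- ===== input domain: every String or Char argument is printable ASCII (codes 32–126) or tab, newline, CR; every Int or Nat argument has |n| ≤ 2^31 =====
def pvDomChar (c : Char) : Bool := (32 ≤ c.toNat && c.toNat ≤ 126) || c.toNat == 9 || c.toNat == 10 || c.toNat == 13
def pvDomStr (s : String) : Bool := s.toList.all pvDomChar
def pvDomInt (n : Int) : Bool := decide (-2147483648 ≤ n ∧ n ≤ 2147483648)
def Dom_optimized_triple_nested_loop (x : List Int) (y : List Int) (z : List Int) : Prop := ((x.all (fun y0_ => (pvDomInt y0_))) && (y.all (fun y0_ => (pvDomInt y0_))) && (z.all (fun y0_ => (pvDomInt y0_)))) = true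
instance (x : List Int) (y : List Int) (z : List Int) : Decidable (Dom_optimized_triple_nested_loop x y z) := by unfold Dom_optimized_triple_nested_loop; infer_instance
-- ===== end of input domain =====

-- B replaces A's inner scan over the z set by one sort of the distinct z values plus a
-- binary search per (i, j) pair (objective: faster). Both sum over sets, so the result
-- does not depend on Python's set iteration order.

-- ===== PORT A =====
def optimized_triple_nested_loop (x : List Int) (y : List Int) (z : List Int) : Int :=
  let x_set := PySem.Set.ofList x
  let y_set := PySem.Set.ofList y
  let z_set := PySem.Set.ofList z
  x_set.foldl (fun count i =>
    y_set.foldl (fun count j =>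
      let needed := 100 - i - j + 1
      count + z_set.foldl (fun s k => if needed ≤ k then s + 1 else s) (0 : Int)) count) 0

-- ===== PORT B =====
-- Source B's hand-written lo/hi halving loop is exactly CPython's bisect_left; it is ported
-- as PySem.List.bisectLeft, whose bisectLeftLoop is that same loop step for step.
def optimized_triple_nested_loop_alt (x : List Int) (y : List Int) (z : List Int) : Int :=
  let zs := PySem.List.sorted (PySem.Set.ofList z) (fun k => k) false
  let n := zs.length
  (PySem.Set.ofList x).foldl (fun count i =>
    (PySem.Set.ofList y).foldl (fun count j =>
      let needed := 101 - i - j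
      count + ((n : Int) - (PySem.List.bisectLeft zs needed : Int))) count) 0

-- ===== PRECONDITION & SPEC =====
def Spec_optimized_triple_nested_loop (x : List Int) (y : List Int) (z : List Int) (out : Int) : Prop := out = optimized_triple_nested_loop_alt x y z
instance (x : List Int) (y : List Int) (z : List Int) (out : Int) : Decidable (Spec_optimized_triple_nested_loop x y z out) := by unfold Spec_optimized_triple_nested_loop; infer_instance

-- ===== CLAIM (what is proved, stated in full; the proofs are below) =====
def Claim_equal_optimized_triple_nested_loop : Prop := ∀ (x : List Int) (y : List Int) (z : List Int), Dom_optimized_triple_nested_loop x y z → Spec_optimized_triple_nested_loop x y z (optimized_triple_nested_loop x y z)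

-- ===== LEMMAS AND PROOFS =====

-- A's inner sum is a countP.
theorem foldl_if_count (p : Int → Prop) [DecidablePred p] (l : List Int) (c : Int) :
    l.foldl (fun s k => if p k then s + 1 else s) c = c + (l.countP (fun k => decide (p k)) : Int) := by
  induction l generalizing c with
  | nil => simp
  | cons a t ih =>
    simp only [List.foldl_cons, List.countP_cons, ih]
    by_cases h : p a
    · simp [h]; ring
    · simp [h]

-- On a sorted list, length - bisect_left v counts the elements ≥ v.
theorem countP_ge_eq_sub_bisect (zs : List Int) (v : Int) (hs : zs.Pairwise (· ≤ ·)) :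
    zs.countP (fun k => decide (v ≤ k)) = zs.length - PySem.List.bisectLeft zs v := by
  obtain ⟨hb, hlt, hge⟩ := PySem.List.bisectLeft_spec zs v hs
  set b := PySem.List.bisectLeft zs v with hbdef
  conv_lhs => rw [← List.take_append_drop b zs]
  rw [List.countP_append]
  have h1 : (zs.take b).countP (fun k => decide (v ≤ k)) = 0 := by
    apply List.countP_eq_zero.2
    intro a ha
    obtain ⟨j, hj, rfl⟩ := List.getElem_of_mem ha
    have hj' : j < zs.length := lt_of_lt_of_le hj (by simp [List.length_take])
    have hjb : j < b := lt_of_lt_of_le hj (by simp [List.length_take])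
    have := hlt j hj' hjb
    simp only [List.getElem_take]
    simpa using not_le.2 this
  have h2 : (zs.drop b).countP (fun k => decide (v ≤ k)) = (zs.drop b).length := by
    apply List.countP_eq_length.2
    intro a ha
    obtain ⟨j, hj, rfl⟩ := List.getElem_of_mem ha
    rw [List.getElem_drop]
    have hj' : b + j < zs.length := by simpa [List.length_drop] using Nat.add_lt_of_lt_sub' (by simpa [List.length_drop] using hj)
    have := hge (b + j) hj' (Nat.le_add_right _ _)
    simpa using this
  rw [h1, h2]
  simp [List.length_drop]

-- The inner loop of A equals B's binary-search count, for every threshold v.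
theorem inner_eq (z : List Int) (v : Int) :
    (PySem.Set.ofList z).foldl (fun s k => if v ≤ k then s + 1 else s) (0 : Int)
      = (((PySem.List.sorted (PySem.Set.ofList z) (fun k => k) false).length : Int)
          - (PySem.List.bisectLeft (PySem.List.sorted (PySem.Set.ofList z) (fun k => k) false) v : Int)) := by
  set zs := PySem.List.sorted (PySem.Set.ofList z) (fun k => k) false with hzs
  have hperm : zs.Perm (PySem.Set.ofList z) := PySem.List.sorted_perm _ _ _
  have hsorted : zs.Pairwise (· ≤ ·) := by
    have := PySem.List.sorted_pairwise (xs := PySem.Set.ofList z) (key := fun k => k)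
    simpa [hzs] using this
  rw [foldl_if_count (fun k => v ≤ k)]
  rw [← hperm.countP_eq]
  rw [countP_ge_eq_sub_bisect zs v hsorted]
  have hble : PySem.List.bisectLeft zs v ≤ zs.length :=
    (PySem.List.bisectLeft_spec zs v hsorted).1
  push_cast [Nat.cast_sub hble]
  ring

-- ===== VERDICT (by name: the statement is the Claim_ definition above) =====
theorem optimized_triple_nested_loop_spec : Claim_equal_optimized_triple_nested_loop := by
  intro x y z _
  show optimized_triple_nested_loop x y z = optimized_triple_nested_loop_alt x y z
  unfold optimized_triple_nested_loop optimized_triple_nested_loop_alt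
  simp only
  congr 1
  funext count i
  congr 1
  funext c j
  rw [show (100 : Int) - i - j + 1 = 101 - i - j by ring, inner_eq z (101 - i - j)]
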